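-- pv_equiv track=rewrite | github.com/krikavap/python-kurz | sifrovani.py | deAlberti
-- ===== SOURCE A (Python) =====
-- def deAlberti(retezec, frm, to1, to2):
--     """
--     dezašifruje Albertiho šifru
--     frm - zdrojová abeceda
--     lichá písmena dle abecedy to1
--     sudá písmena dle abecedy to2
--     vrátí rozšifrovaný řetězec
--     """
--     novyRetezec = ""
--
--     trans_table1 = str.maketrans(to1, frm)
--     secret_code1 = retezec.translate(trans_table1)
--
--     trans_table2 = str.maketrans(to2, frm)
--     secret_code2 = retezec.translate(trans_table2)
--
--     for i in range(0, len(retezec)):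
--         if i % 2 == 0:
--             novyRetezec = novyRetezec + secret_code2[i]
--         else:
--             novyRetezec = novyRetezec + secret_code1[i]
--         pass
--     return novyRetezec
-- ===== SOURCE B (Python) =====
-- def deAlberti(retezec, frm, to1, to2):
--     # dezašifruje Albertiho šifru: even positions via to2->frm, odd via to1->frm.
--     # Builds two plain dicts (no maketrans/translate) and consumes the string
--     # two characters at a time, so no per-index parity test is needed.
--     even = dict(zip(to2, frm, strict=True))
--     odd = dict(zip(to1, frm, strict=True))
--     out = []
--     it = iter(retezec)
--     for a in it:
--         out.append(even.get(a, a))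
--         b = next(it, None)
--         if b is None:
--             break
--         out.append(odd.get(b, b))
--     return "".join(out)
-- ===== Notes on version B (the rewrite author's own statement) =====
-- stated objective: alternative
-- what changed: B discards maketrans/translate and the index loop: it builds two plain dicts from zip(to,frm,strict=True) and walks the string's iterator two characters at a time (even char, then next() for the odd char), so there is no parity test, no index arithmetic and no pre-translated copies.
import Mathlib
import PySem

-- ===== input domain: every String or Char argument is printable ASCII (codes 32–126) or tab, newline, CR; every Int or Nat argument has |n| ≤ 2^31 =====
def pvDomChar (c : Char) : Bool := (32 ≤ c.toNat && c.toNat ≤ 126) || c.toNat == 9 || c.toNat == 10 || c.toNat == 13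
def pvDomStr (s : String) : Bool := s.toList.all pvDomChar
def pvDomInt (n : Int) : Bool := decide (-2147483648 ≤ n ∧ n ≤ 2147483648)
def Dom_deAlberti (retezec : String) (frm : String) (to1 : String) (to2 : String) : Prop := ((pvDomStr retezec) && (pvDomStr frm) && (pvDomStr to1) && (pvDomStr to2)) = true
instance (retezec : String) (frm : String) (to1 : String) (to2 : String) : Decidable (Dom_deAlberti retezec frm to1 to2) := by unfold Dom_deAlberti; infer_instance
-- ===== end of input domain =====

-- B drops maketrans/translate entirely: it builds two plain dicts and consumes the string
-- two characters at a time, so there is no index loop and no parity test (objective: alternative).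

-- ===== PORT A =====
-- str.maketrans(to, frm): dict built left to right, later duplicate keys overwrite (exact)
def pvMakeTrans (tos : String) (frm : String) : PySem.Dict Char Char :=
  (tos.toList.zip frm.toList).foldl (fun d p => d.insert p.1 p.2) PySem.Dict.empty

-- s.translate(t): each char mapped through the table, unmapped chars kept (exact)
def pvTranslate (s : List Char) (t : PySem.Dict Char Char) : List Char :=
  s.map (fun c => t.getD c c)

def deAlberti (retezec : String) (frm : String) (to1 : String) (to2 : String) : String :=
  let trans_table1 := pvMakeTrans to1 frm
  let secret_code1 := pvTranslate retezec.toList trans_table1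
  let trans_table2 := pvMakeTrans to2 frm
  let secret_code2 := pvTranslate retezec.toList trans_table2
  String.ofList ((PySem.List.pyRange 0 (PySem.Str.len retezec) 1).foldl
    (fun acc i =>
      if i % 2 == 0 then acc ++ [PySem.List.pyGetD secret_code2 i ' ']
      else acc ++ [PySem.List.pyGetD secret_code1 i ' ']) [])

-- ===== PORT B =====
-- dict(zip(to, frm)) is the same left-to-right dict build as str.maketrans: pvMakeTrans is reused
-- B's loop: consume the characters two at a time (the for-over-iter with an inner next)
def pvPairLoop (even odd : PySem.Dict Char Char) : List Char → List Char
  | [] => []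
  | [a] => [even.getD a a]
  | a :: b :: rest => even.getD a a :: odd.getD b b :: pvPairLoop even odd rest

def deAlberti_alt (retezec : String) (frm : String) (to1 : String) (to2 : String) : String :=
  let even := pvMakeTrans to2 frm
  let odd := pvMakeTrans to1 frm
  String.ofList (pvPairLoop even odd retezec.toList)

-- ===== PRECONDITION & SPEC =====
-- Pre_ excludes exactly the inputs where both programs raise ValueError (A via str.maketrans,
-- B via zip(..., strict=True)):
-- the two target alphabets must have the same length as the source alphabet.
def Pre_deAlberti (retezec : String) (frm : String) (to1 : String) (to2 : String) : Prop :=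
  to1.toList.length = frm.toList.length ∧ to2.toList.length = frm.toList.length
instance (retezec : String) (frm : String) (to1 : String) (to2 : String) : Decidable (Pre_deAlberti retezec frm to1 to2) := by unfold Pre_deAlberti; infer_instance

def pvWitness_deAlberti : String × String × String × String := ("hello", "abcde", "bcdef", "cdefg")

def Spec_deAlberti (retezec : String) (frm : String) (to1 : String) (to2 : String) (out : String) : Prop := out = deAlberti_alt retezec frm to1 to2
instance (retezec : String) (frm : String) (to1 : String) (to2 : String) (out : String) : Decidable (Spec_deAlberti retezec frm to1 to2 out) := by unfold Spec_deAlberti; infer_instance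

-- ===== CLAIM (what is proved, stated in full; the proofs are below) =====
def Claim_equal_deAlberti : Prop := ∀ (retezec : String) (frm : String) (to1 : String) (to2 : String), Dom_deAlberti retezec frm to1 to2 → Pre_deAlberti retezec frm to1 to2 → Spec_deAlberti retezec frm to1 to2 (deAlberti retezec frm to1 to2)

-- ===== LEMMAS AND PROOFS =====

-- index-shift for pyGetD on a cons cell (used by the loop lemma)
theorem pvGetD_cons_shift (c : Char) (l : List Char) (k : Int) (hk : 1 ≤ k)
    (hlen : k < (l.length : Int) + 1) :
    PySem.List.pyGetD (c :: l) k ' ' = PySem.List.pyGetD l (k - 1) ' ' := by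
  rw [PySem.List.pyGetD_eq_getElem _ _ (by omega) (by simp; omega),
      PySem.List.pyGetD_eq_getElem _ _ (by omega) (by omega)]
  have h : k.toNat = (k - 1).toNat + 1 := by omega
  simp only [h, List.getElem_cons_succ]

-- A's loop, as a map over the enumerated character list.
theorem deAlberti_loop_eq_map (f1 f2 : Char → Char) (xs : List Char) (s : Int) (hs : 0 ≤ s)
    (acc : List Char) :
    (PySem.List.pyRange s (s + xs.length) 1).foldl
      (fun acc i =>
        if i % 2 == 0 then acc ++ [PySem.List.pyGetD (xs.map f2) (i - s) ' ']
        else acc ++ [PySem.List.pyGetD (xs.map f1) (i - s) ' ']) acc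
    = acc ++ (PySem.List.enumerate xs s).map
        (fun p => if p.1 % 2 == 0 then f2 p.2 else f1 p.2) := by
  induction xs generalizing s acc with
  | nil =>
    rw [show s + ((([] : List Char).length : Nat) : Int) = s by simp,
        PySem.List.pyRange_one_eq_nil (le_refl s)]
    simp [PySem.List.enumerate_nil]
  | cons x rest ih =>
    have hlt : s < s + (x :: rest).length := by simp only [List.length_cons]; push_cast; omega
    rw [PySem.List.pyRange_one_cons hlt]
    simp only [List.foldl_cons, List.map_cons, sub_self, PySem.List.pyGetD_zero_cons]
    have hrange : s + (((x :: rest).length : Nat) : Int) = (s + 1) + (rest.length : Int) := by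
      simp only [List.length_cons]; push_cast; ring
    have hshift : ∀ acc0 : List Char,
        (PySem.List.pyRange (s + 1) ((s + 1) + (rest.length : Int)) 1).foldl
        (fun acc i =>
          if i % 2 == 0 then acc ++ [PySem.List.pyGetD (f2 x :: rest.map f2) (i - s) ' ']
          else acc ++ [PySem.List.pyGetD (f1 x :: rest.map f1) (i - s) ' ']) acc0
        = (PySem.List.pyRange (s + 1) ((s + 1) + (rest.length : Int)) 1).foldl
        (fun acc i =>
          if i % 2 == 0 then acc ++ [PySem.List.pyGetD (rest.map f2) (i - (s + 1)) ' ']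
          else acc ++ [PySem.List.pyGetD (rest.map f1) (i - (s + 1)) ' ']) acc0 := by
      intro acc0
      apply PySem.List.foldl_congr_mem
      intro a i hi
      rw [PySem.List.mem_pyRange_one] at hi
      have hk : 1 ≤ i - s := by omega
      have hl2 : i - s < ((rest.map f2).length : Int) + 1 := by simp; omega
      have hl1 : i - s < ((rest.map f1).length : Int) + 1 := by simp; omega
      rw [pvGetD_cons_shift _ _ _ hk hl2, pvGetD_cons_shift _ _ _ hk hl1]
      have he : i - s - 1 = i - (s + 1) := by ring
      rw [he]
    rw [hrange, hshift, ih (s + 1) (by omega), PySem.List.enumerate_cons, List.map_cons]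
    by_cases hpar : (s % 2 == 0) = true
    · rw [if_pos hpar, if_pos hpar]; simp
    · rw [if_neg hpar, if_neg hpar]; simp

-- the parity map over enumerate equals B's pair loop (two-step induction, even start)
theorem enum_map_eq_pairLoop (even odd : PySem.Dict Char Char) (xs : List Char) :
    ∀ s : Int, s % 2 = 0 →
    (PySem.List.enumerate xs s).map
      (fun p => if p.1 % 2 == 0 then even.getD p.2 p.2 else odd.getD p.2 p.2)
    = pvPairLoop even odd xs := by
  induction xs using pvPairLoop.induct with
  | case1 => intro s _; simp [PySem.List.enumerate_nil, pvPairLoop]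
  | case2 a =>
    intro s hs
    simp [PySem.List.enumerate_cons, PySem.List.enumerate_nil, pvPairLoop, hs]
  | case3 a b rest ih =>
    intro s hs
    have h1 : ((s % 2 == 0) = true) := by simp; omega
    have h2 : ¬ (((s + 1) % 2 == 0) = true) := by simp; omega
    rw [PySem.List.enumerate_cons, PySem.List.enumerate_cons, List.map_cons, List.map_cons,
        if_pos h1, if_neg h2, pvPairLoop, ih (s + 1 + 1) (by omega)]

-- ===== VERDICT (by name: the statement is the Claim_ definition above) =====
theorem deAlberti_spec : Claim_equal_deAlberti := by
  intro retezec frm to1 to2 _ _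
  unfold Spec_deAlberti deAlberti deAlberti_alt pvTranslate
  have h := deAlberti_loop_eq_map
      (fun c => (pvMakeTrans to1 frm).getD c c)
      (fun c => (pvMakeTrans to2 frm).getD c c)
      retezec.toList 0 (le_refl 0) []
  simp only [zero_add, sub_zero, List.nil_append] at h
  simp only [PySem.Str.len_eq]
  rw [h, enum_map_eq_pairLoop (pvMakeTrans to2 frm) (pvMakeTrans to1 frm) retezec.toList 0 rfl]
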